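-- pv_equiv track=rewrite | github.com/jeremy-pickett/granite | backend/src/signal_block.py | _bits_to_symbol_values
-- ===== SOURCE A (Python) =====
-- BITS_PER_COEFF = 2
--
-- def _bits_to_symbol_values(bits: list[int]) -> list[int]:
--     """Convert bit list to list of modular symbol values (0..MODULUS-1)."""
--     symbols = []
--     for i in range(0, len(bits), BITS_PER_COEFF):
--         val = 0
--         for j in range(BITS_PER_COEFF):
--             if i + j < len(bits):
--                 val = (val << 1) | bits[i + j]
--         symbols.append(val)
--     return symbols
-- ===== SOURCE B (Python) =====
-- def _bits_to_symbol_values(bits: list[int]) -> list[int]: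
--     """Convert bit list to list of modular symbol values (0..MODULUS-1)."""
--     symbols = []
--     val = 0
--     cnt = 0
--     for b in bits:
--         val = (val << 1) | b
--         cnt += 1
--         if cnt == 2:
--             symbols.append(val)
--             val = 0
--             cnt = 0
--     if cnt > 0:
--         symbols.append(val)
--     return symbols
-- ===== Notes on version B (the rewrite author's own statement) =====
-- stated objective: faster
-- what changed: Replaced the index-arithmetic nested loops (outer range with step 2, inner bounds-checked list indexing) by a single direct streaming pass over the bits with a value/count accumulator and a final flush for a trailing odd bit.
import Mathlib
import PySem

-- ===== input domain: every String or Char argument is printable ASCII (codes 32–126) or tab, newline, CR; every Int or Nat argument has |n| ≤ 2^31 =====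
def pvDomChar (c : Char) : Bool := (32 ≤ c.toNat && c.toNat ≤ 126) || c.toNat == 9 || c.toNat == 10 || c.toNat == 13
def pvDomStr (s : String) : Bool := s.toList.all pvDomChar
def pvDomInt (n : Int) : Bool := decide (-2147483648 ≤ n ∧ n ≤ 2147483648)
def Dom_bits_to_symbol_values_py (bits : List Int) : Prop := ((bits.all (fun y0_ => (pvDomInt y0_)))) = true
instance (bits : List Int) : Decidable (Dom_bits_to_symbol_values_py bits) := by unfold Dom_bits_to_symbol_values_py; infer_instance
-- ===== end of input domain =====

-- B replaces A's step-2 index loop with nested bounds-checked indexing by one direct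
-- streaming pass over the bits with a value/count accumulator and a final flush (alternative).

-- ===== PORT A =====
-- for i in range(0, len(bits), 2): val = 0; for j in range(2): if i+j < len(bits): val = (val << 1) | bits[i+j]; symbols.append(val)
def bits_to_symbol_values_py (bits : List Int) : List Int :=
  (PySem.List.pyRange 0 (bits.length : Int) 2).foldl (fun symbols i =>
    let val := (PySem.List.pyRange 0 2 1).foldl (fun val j =>
      if i + j < (bits.length : Int) then PySem.Int.bor (val <<< (1 : Nat)) (PySem.List.pyGetD bits (i + j) 0)
      else val) 0
    symbols ++ [val]) []

-- ===== PORT B =====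
-- streaming pass: state (val, cnt, symbols); emit on cnt = 2, flush a trailing odd bit
def bits_to_symbol_values_py_alt (bits : List Int) : List Int :=
  let st := bits.foldl (fun (st : Int × Int × List Int) b =>
    let val := PySem.Int.bor (st.1 <<< (1 : Nat)) b
    let cnt := st.2.1 + 1
    if cnt = 2 then (0, 0, st.2.2 ++ [val]) else (val, cnt, st.2.2)) (0, 0, [])
  if st.2.1 > 0 then st.2.2 ++ [st.1] else st.2.2

-- ===== PRECONDITION & SPEC =====
def Spec_bits_to_symbol_values_py (bits : List Int) (out : List Int) : Prop := out = bits_to_symbol_values_py_alt bits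
instance (bits : List Int) (out : List Int) : Decidable (Spec_bits_to_symbol_values_py bits out) := by unfold Spec_bits_to_symbol_values_py; infer_instance

-- ===== CLAIM (what is proved, stated in full; the proofs are below) =====
def Claim_equal_bits_to_symbol_values_py : Prop := ∀ (bits : List Int), Dom_bits_to_symbol_values_py bits → Spec_bits_to_symbol_values_py bits (bits_to_symbol_values_py bits)

-- ===== LEMMAS AND PROOFS =====

-- common reference form: the list of 2-bit symbols, one lone trailing bit kept as-is
def pvPairs : List Int → List Int
  | [] => []
  | [a] => [a]
  | a :: b :: r => PySem.Int.bor (a <<< (1 : Nat)) b :: pvPairs r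

theorem pv_bor_zero_left (a : Int) : PySem.Int.bor 0 a = a := by
  rw [PySem.Int.bor_comm]; exact PySem.Int.bor_zero a

theorem pyRange_two_nil (a b : Int) (h : b ≤ a) : PySem.List.pyRange a b 2 = [] := by
  rw [PySem.List.pyRange_of_pos a b (by norm_num)]
  simp [show ¬ a < b by omega]

theorem pyRange_two_cons (a b : Int) (h : a < b) :
    PySem.List.pyRange a b 2 = a :: PySem.List.pyRange (a + 2) b 2 := by
  rw [PySem.List.pyRange_of_pos a b (by norm_num),
      PySem.List.pyRange_of_pos (a + 2) b (by norm_num)]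
  by_cases h2 : a + 2 < b
  · have hn : ((b - a + 2 - 1) / 2).toNat = ((b - (a + 2) + 2 - 1) / 2).toNat + 1 := by
      omega
    simp only [if_pos h, if_pos h2, hn, List.range_succ_eq_map, List.map_cons, List.map_map]
    refine List.cons_eq_cons.mpr ⟨by simp, ?_⟩
    apply List.map_congr_left; intro k _
    simp only [Function.comp_apply]
    push_cast; ring
  · have hn : ((b - a + 2 - 1) / 2).toNat = 1 := by omega
    simp [if_pos h, if_neg h2, hn, List.range_succ]

theorem A_loop (bits : List Int) : ∀ (k : Nat) (acc : List Int),
    (PySem.List.pyRange (k : Int) (bits.length : Int) 2).foldl (fun symbols i =>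
      let val := (PySem.List.pyRange 0 2 1).foldl (fun val j =>
        if i + j < (bits.length : Int) then PySem.Int.bor (val <<< (1 : Nat)) (PySem.List.pyGetD bits (i + j) 0)
        else val) 0
      symbols ++ [val]) acc = acc ++ pvPairs (bits.drop k) := by
  intro k
  induction hm : bits.length - k using Nat.strong_induction_on generalizing k with
  | _ m IH =>
    intro acc
    by_cases hk : k < bits.length
    · rw [pyRange_two_cons _ _ (by exact_mod_cast hk)]
      simp only [List.foldl_cons]
      have hget0 : PySem.List.pyGetD bits ((k : Int) + 0) 0 = bits[k] := by
        rw [show ((k : Int) + 0) = (k : Int) by ring]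
        rw [PySem.List.pyGetD_natCast]
        exact List.getD_eq_getElem bits 0 hk
      by_cases hk1 : k + 1 < bits.length
      · have hget1 : PySem.List.pyGetD bits ((k : Int) + 1) 0 = bits[k+1] := by
          rw [show ((k : Int) + 1) = ((k + 1 : Nat) : Int) by push_cast; ring]
          rw [PySem.List.pyGetD_natCast]
          exact List.getD_eq_getElem bits 0 hk1
        have c0 : ((k : Int) + 0 < (bits.length : Int)) := by omega
        have c1 : ((k : Int) + 1 < (bits.length : Int)) := by omega
        have hval : ((PySem.List.pyRange 0 2 1).foldl (fun val j =>
            if (k : Int) + j < (bits.length : Int) then PySem.Int.bor (val <<< (1 : Nat)) (PySem.List.pyGetD bits ((k : Int) + j) 0)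
            else val) 0) = PySem.Int.bor (bits[k] <<< (1 : Nat)) bits[k+1] := by
          have hr2 : PySem.List.pyRange 0 2 1 = [0, 1] := by decide
          rw [hr2]
          simp only [List.foldl_cons, List.foldl_nil, if_pos c0, if_pos c1]
          rw [hget0, hget1]
          simp [pv_bor_zero_left]
        rw [hval]
        have hcast : ((k : Int) + 2) = (((k + 2 : Nat)) : Int) := by push_cast; ring
        rw [hcast, IH (bits.length - (k + 2)) (by omega) (k + 2) rfl]
        have hdrop : bits.drop k = bits[k] :: bits[k+1] :: bits.drop (k + 2) := by
          rw [List.drop_eq_getElem_cons hk, List.drop_eq_getElem_cons hk1]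
        rw [hdrop]
        simp [pvPairs]
      · -- lone trailing bit: k + 1 = bits.length
        have c0 : ((k : Int) + 0 < (bits.length : Int)) := by omega
        have c1 : ¬ ((k : Int) + 1 < (bits.length : Int)) := by omega
        have hval : ((PySem.List.pyRange 0 2 1).foldl (fun val j =>
            if (k : Int) + j < (bits.length : Int) then PySem.Int.bor (val <<< (1 : Nat)) (PySem.List.pyGetD bits ((k : Int) + j) 0)
            else val) 0) = bits[k] := by
          have hr2 : PySem.List.pyRange 0 2 1 = [0, 1] := by decide
          rw [hr2]
          simp only [List.foldl_cons, List.foldl_nil, if_pos c0, if_neg c1]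
          rw [hget0]
          simp [pv_bor_zero_left]
        rw [hval]
        have hcast : ((k : Int) + 2) = (((k + 2 : Nat)) : Int) := by push_cast; ring
        rw [hcast, IH (bits.length - (k + 2)) (by omega) (k + 2) rfl]
        have hdrop : bits.drop k = [bits[k]] := by
          rw [List.drop_eq_getElem_cons hk]
          have : bits.drop (k + 1) = [] := List.drop_eq_nil_of_le (by omega)
          rw [this]
        have hdrop2 : bits.drop (k + 2) = [] := List.drop_eq_nil_of_le (by omega)
        rw [hdrop, hdrop2]
        simp [pvPairs]
    · rw [pyRange_two_nil _ _ (by exact_mod_cast Nat.le_of_not_lt hk)]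
      rw [List.drop_eq_nil_of_le (Nat.le_of_not_lt hk)]
      simp [pvPairs]

theorem B_loop : ∀ (bits : List Int) (acc : List Int),
    (let st := bits.foldl (fun (st : Int × Int × List Int) b =>
       let val := PySem.Int.bor (st.1 <<< (1 : Nat)) b
       let cnt := st.2.1 + 1
       if cnt = 2 then (0, 0, st.2.2 ++ [val]) else (val, cnt, st.2.2)) (0, 0, acc)
     if st.2.1 > 0 then st.2.2 ++ [st.1] else st.2.2) = acc ++ pvPairs bits := by
  intro bits
  induction bits using pvPairs.induct with
  | case1 => intro acc; simp [pvPairs]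
  | case2 a =>
      intro acc
      simp only [List.foldl_cons, List.foldl_nil]
      norm_num [pvPairs, pv_bor_zero_left]
  | case3 a b r IH =>
      intro acc
      simp only [List.foldl_cons]
      norm_num [pv_bor_zero_left]
      rw [IH (acc ++ [PySem.Int.bor (a <<< (1 : Nat)) b])]
      simp [pvPairs]

-- ===== VERDICT (by name: the statement is the Claim_ definition above) =====
theorem bits_to_symbol_values_py_spec : Claim_equal_bits_to_symbol_values_py := by
  intro bits _
  unfold Spec_bits_to_symbol_values_py bits_to_symbol_values_py bits_to_symbol_values_py_alt
  have hA := A_loop bits 0 []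
  simp only [Nat.cast_zero, List.drop_zero, List.nil_append] at hA
  rw [hA, B_loop bits []]
  simp
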